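-- pv_equiv track=rewrite | github.com/moqingx52/xr_teleoperate | teleop/teleop_omnipicker_and_arm.py | _rewrite_aliases
-- ===== SOURCE A (Python) =====
-- def _rewrite_aliases(argv):
--     alias_map = {
--         "--json": "--hamer-json",
--         "--json_path": "--hamer-json",
--         "--cam2base-json": "--hamer-cam2base-json",
--         "--cam2base_json": "--hamer-cam2base-json",
--         "--wrist2ee-json": "--wrist-to-ee-json",
--         "--wrist2ee_json": "--wrist-to-ee-json",
--         "--parquet-action-fallback-mode": "--hamer-parquet-action-fallback-mode",
--         "--parquet_action_fallback_mode": "--hamer-parquet-action-fallback-mode",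
--     }
--     rewritten = []
--     for a in argv:
--         replaced = a
--         for old, new in alias_map.items():
--             if a == old:
--                 replaced = new
--                 break
--             prefix = old + "="
--             if a.startswith(prefix):
--                 replaced = new + "=" + a[len(prefix):]
--                 break
--         rewritten.append(replaced)
--     return rewritten
-- ===== SOURCE B (Python) =====
-- def _rewrite_aliases(argv):
--     alias_map = {
--         "--json": "--hamer-json",
--         "--json_path": "--hamer-json",
--         "--cam2base-json": "--hamer-cam2base-json",
--         "--cam2base_json": "--hamer-cam2base-json",
--         "--wrist2ee-json": "--wrist-to-ee-json",
--         "--wrist2ee_json": "--wrist-to-ee-json",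
--         "--parquet-action-fallback-mode": "--hamer-parquet-action-fallback-mode",
--         "--parquet_action_fallback_mode": "--hamer-parquet-action-fallback-mode",
--     }
--
--     def fix(a):
--         key, sep, value = a.partition("=")
--         new = alias_map.get(key)
--         return a if new is None else new + sep + value
--
--     return [fix(a) for a in argv]
-- ===== Notes on version B (the rewrite author's own statement) =====
-- stated objective: faster
-- what changed: B replaces A's inner linear scan over the alias table (an equality test plus a startswith prefix test per entry) by a single partition of the argument at its first '=' followed by one direct dict lookup of the key.
import Mathlib
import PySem

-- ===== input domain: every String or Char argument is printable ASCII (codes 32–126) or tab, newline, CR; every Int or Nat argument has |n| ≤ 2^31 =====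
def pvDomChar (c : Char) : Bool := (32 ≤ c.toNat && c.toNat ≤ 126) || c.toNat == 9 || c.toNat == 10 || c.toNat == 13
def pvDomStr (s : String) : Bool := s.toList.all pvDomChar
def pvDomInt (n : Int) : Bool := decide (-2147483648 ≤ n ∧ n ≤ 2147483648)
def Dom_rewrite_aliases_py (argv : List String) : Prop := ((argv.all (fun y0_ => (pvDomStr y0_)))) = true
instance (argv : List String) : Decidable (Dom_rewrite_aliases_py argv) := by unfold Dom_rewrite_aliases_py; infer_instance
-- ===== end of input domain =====

-- B replaces A's inner scan over the alias table (equality test + prefix test per entry)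
-- by one partition at the first '=' and a single dict lookup of the key (measured faster by a constant factor).

-- ===== PORT A =====
-- the alias_map dict literal, as its item list (iterated in insertion order)
def pvAliasMap : List (String × String) :=
  [("--json", "--hamer-json"),
   ("--json_path", "--hamer-json"),
   ("--cam2base-json", "--hamer-cam2base-json"),
   ("--cam2base_json", "--hamer-cam2base-json"),
   ("--wrist2ee-json", "--wrist-to-ee-json"),
   ("--wrist2ee_json", "--wrist-to-ee-json"),
   ("--parquet-action-fallback-mode", "--hamer-parquet-action-fallback-mode"),
   ("--parquet_action_fallback_mode", "--hamer-parquet-action-fallback-mode")]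

-- Python string concatenation, exact: s + t on str is the code-point list append
def pvCat (s t : String) : String := String.ofList (s.toList ++ t.toList)

-- A's inner 'for old, new in alias_map.items(): … break' with 'replaced' as the result
def pvScanA (a : String) : List (String × String) → String
  | [] => a
  | (old, nw) :: rest =>
    if a == old then nw
    else
      let pfx := pvCat old "="
      if PySem.Str.startswith a pfx then
        pvCat (pvCat nw "=") (PySem.Str.slice a (some (PySem.Str.len pfx)) none)
      else pvScanA a rest

def rewrite_aliases_py (argv : List String) : List String :=
  argv.foldl (fun rewritten a => rewritten ++ [pvScanA a pvAliasMap]) []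

-- ===== PORT B =====
-- hand port of a.partition("="): exact for this single-character separator
def pvPartitionEq (a : String) : String × String × String :=
  let cs := a.toList
  let pre := cs.takeWhile (fun c => c != '=')
  match cs.dropWhile (fun c => c != '=') with
  | [] => (String.ofList pre, "", "")
  | _ :: t => (String.ofList pre, "=", String.ofList t)

def pvAliasDict : PySem.Dict String String := PySem.Dict.ofList pvAliasMap

def pvFixB (a : String) : String :=
  let p := pvPartitionEq a
  match pvAliasDict.get? p.1 with
  | none => a
  | some nw => pvCat (pvCat nw p.2.1) p.2.2

def rewrite_aliases_py_alt (argv : List String) : List String :=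
  argv.map pvFixB

-- ===== PRECONDITION & SPEC =====
def Spec_rewrite_aliases_py (argv : List String) (out : List String) : Prop := out = rewrite_aliases_py_alt argv
instance (argv : List String) (out : List String) : Decidable (Spec_rewrite_aliases_py argv out) := by unfold Spec_rewrite_aliases_py; infer_instance

-- ===== CLAIM (what is proved, stated in full; the proofs are below) =====
def Claim_equal_rewrite_aliases_py : Prop := ∀ (argv : List String), Dom_rewrite_aliases_py argv → Spec_rewrite_aliases_py argv (rewrite_aliases_py argv)

-- ===== LEMMAS AND PROOFS =====

-- A's per-pair match condition is exactly "the partition key equals old", for an '='-free old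
lemma pv_match_iff (cs os : List Char) (h : '=' ∉ os) :
    (cs = os ∨ (os ++ ['=']) <+: cs) ↔ cs.takeWhile (fun c => c != '=') = os := by
  have hos : ∀ c ∈ os, (fun c => c != '=') c = true := by
    intro c hc
    simp only [bne_iff_ne, ne_eq]
    rintro rfl; exact h hc
  constructor
  · rintro (rfl | ⟨t, ht⟩)
    · exact List.takeWhile_eq_self_iff.mpr hos
    · rw [← ht, List.append_assoc, List.singleton_append,
        List.takeWhile_append_of_pos hos]
      simp [List.takeWhile]
  · intro hk
    have hsplit := List.takeWhile_append_dropWhile (p := fun c => c != '=') (l := cs)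
    rw [hk] at hsplit
    cases hrest : cs.dropWhile (fun c => c != '=') with
    | nil => left; rw [hrest] at hsplit; simpa using hsplit.symm
    | cons c t =>
      have hc : (fun c => c != '=') c = false := by
        have := List.head_dropWhile_not (fun c => c != '=') (l := cs) (by simp [hrest])
        simpa [hrest] using this
      have hce : c = '=' := by simpa using hc
      subst hce
      rw [hrest] at hsplit
      exact Or.inr ⟨t, by rw [← hsplit]; simp⟩

-- the partition's three components, by cases on the remainder after the key
lemma pvPartitionEq_fst (a : String) :
    (pvPartitionEq a).1 = String.ofList (a.toList.takeWhile (fun c => c != '=')) := by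
  simp only [pvPartitionEq]
  cases h : a.toList.dropWhile (fun c => c != '=') <;> rfl

lemma pvPartitionEq_of_nil (a : String) (h : a.toList.dropWhile (fun c => c != '=') = []) :
    pvPartitionEq a = (String.ofList (a.toList.takeWhile (fun c => c != '=')), "", "") := by
  simp only [pvPartitionEq]
  rw [h]

lemma pvPartitionEq_of_cons (a : String) (c : Char) (t : List Char)
    (h : a.toList.dropWhile (fun c => c != '=') = c :: t) :
    pvPartitionEq a = (String.ofList (a.toList.takeWhile (fun c => c != '=')), "=", String.ofList t) := by
  simp only [pvPartitionEq]
  rw [h]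

lemma pv_scan_eq (a : String) (l : List (String × String))
    (h : ∀ p ∈ l, '=' ∉ p.1.toList) :
    pvScanA a l =
      (match (PySem.Dict.mk l).get? (pvPartitionEq a).1 with
       | none => a
       | some nw => pvCat (pvCat nw (pvPartitionEq a).2.1) (pvPartitionEq a).2.2) := by
  induction l with
  | nil => simp [pvScanA, PySem.Dict.get?]
  | cons hd tl ih =>
    obtain ⟨old, nw⟩ := hd
    have hold : '=' ∉ old.toList := h (old, nw) (by simp)
    have htl : ∀ p ∈ tl, '=' ∉ p.1.toList := fun p hp => h p (List.mem_cons_of_mem _ hp)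
    rw [PySem.Dict.get?_mk_cons]
    by_cases hk : a.toList.takeWhile (fun c => c != '=') = old.toList
    · -- this pair matches in both programs
      have hkey : (old == (pvPartitionEq a).1) = true := by
        rw [pvPartitionEq_fst, beq_iff_eq, hk, String.ofList_toList]
      rw [if_pos hkey]
      have hsplit := List.takeWhile_append_dropWhile (p := fun c => c != '=') (l := a.toList)
      rw [hk] at hsplit
      cases hrest : a.toList.dropWhile (fun c => c != '=') with
      | nil =>
        -- a equals old exactly
        have hao : a = old := String.toList_inj.mp (by rw [hrest] at hsplit; simpa using hsplit.symm)
        rw [pvPartitionEq_of_nil a hrest]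
        simp [pvScanA, hao, pvCat]
      | cons c t =>
        have hc : c = '=' := by
          have := List.head_dropWhile_not (fun c => c != '=') (l := a.toList) (by simp [hrest])
          simpa [hrest] using this
        subst hc
        rw [hrest] at hsplit
        -- a starts with old ++ "=" but a is not old itself
        have hne : (a == old) = false := by
          simp only [beq_eq_false_iff_ne, ne_eq]
          intro hao
          rw [hao] at hsplit
          have := congrArg List.length hsplit
          simp at this
        have hsw : PySem.Str.startswith a (pvCat old "=") = true := by
          simp only [PySem.Str.startswith_eq]
          rw [PySem.Chars.startswith_iff]
          exact ⟨t, by simp [pvCat, ← hsplit]⟩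
        rw [pvPartitionEq_of_cons a '=' t hrest]
        simp only [pvScanA, hne, Bool.false_eq_true, if_false, hsw, if_true]
        -- the tail after the matched prefix is the partition's value part
        have hdrop : a.toList.drop (old.toList.length + 1) = t := by
          rw [← hsplit]
          simpa using List.drop_length_add_append 1 (l₁ := old.toList) (l₂ := '=' :: t)
        have hslice : PySem.Str.slice a (some (PySem.Str.len (pvCat old "="))) none = String.ofList t := by
          refine String.toList_inj.mp ?_
          have hlen : PySem.Str.len (pvCat old "=") = ((old.toList.length + 1 : Nat) : Int) := by
            simp [PySem.Str.len_eq, pvCat]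
          simp only [PySem.Str.toList_slice, PySem.Chars.slice_eq_listSlice, hlen, String.toList_ofList]
          rw [PySem.List.slice_from _ (by positivity)]
          simpa using hdrop
        rw [hslice]
    · -- no match on this pair in either program
      have hkey : ¬ ((old == (pvPartitionEq a).1) = true) := by
        rw [pvPartitionEq_fst, beq_iff_eq]
        intro he
        exact hk (by rw [he, String.toList_ofList])
      rw [if_neg hkey]
      have hnm : ¬ (a.toList = old.toList ∨ (old.toList ++ ['=']) <+: a.toList) :=
        fun hm => hk ((pv_match_iff a.toList old.toList hold).mp hm)
      push Not at hnm
      have hne : (a == old) = false := by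
        simp only [beq_eq_false_iff_ne, ne_eq]
        intro hao; exact hnm.1 (by rw [hao])
      have hsw : PySem.Str.startswith a (pvCat old "=") = false := by
        simp only [PySem.Str.startswith_eq]
        rw [Bool.eq_false_iff, ne_eq, PySem.Chars.startswith_iff]
        simpa [pvCat] using hnm.2
      simp only [pvScanA, hne, Bool.false_eq_true, if_false, hsw]
      exact ih htl

-- ===== VERDICT (by name: the statement is the Claim_ definition above) =====
theorem rewrite_aliases_py_spec : Claim_equal_rewrite_aliases_py := by
  intro argv _
  unfold Spec_rewrite_aliases_py rewrite_aliases_py rewrite_aliases_py_alt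
  rw [PySem.List.foldl_append_singleton_eq_map]
  simp only [List.nil_append]
  refine List.map_congr_left (fun a _ => ?_)
  have h : ∀ p ∈ pvAliasMap, '=' ∉ p.1.toList := by decide
  have hd : pvAliasDict = PySem.Dict.mk pvAliasMap := by decide
  rw [pv_scan_eq a pvAliasMap h]
  unfold pvFixB
  rw [hd]
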